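-- pv_equiv track=rewrite | github.com/ahmed-abd-elgawwad/nodal-anlaysis-app | ipr.py | process_vlp
-- ===== SOURCE A (Python) =====
-- def process_vlp(data):
--     q ,p = data[0],data[1]
--     p_min_index =0
--     for i ,v in enumerate(p):
--         if v == min(p):
--             p_min_index = i
--     q=q[p_min_index:]
--     p=p[p_min_index:]
--     return q,p
-- ===== SOURCE B (Python) =====
-- def process_vlp(data):
--     q, p = data[0], data[1]
--     idx, m = 0, None
--     for i, v in enumerate(p):
--         if m is None or v <= m:
--             m, idx = v, i
--     return q[idx:], p[idx:]
-- ===== Notes on version B (the rewrite author's own statement) =====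
-- stated objective: faster
-- what changed: A recomputes min(p) on every loop iteration and records the last index that equals it (O(n^2)); B never calls min(): it keeps a running minimum and updates (m, idx) whenever v <= m in a single online pass (O(n)).
import Mathlib
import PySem

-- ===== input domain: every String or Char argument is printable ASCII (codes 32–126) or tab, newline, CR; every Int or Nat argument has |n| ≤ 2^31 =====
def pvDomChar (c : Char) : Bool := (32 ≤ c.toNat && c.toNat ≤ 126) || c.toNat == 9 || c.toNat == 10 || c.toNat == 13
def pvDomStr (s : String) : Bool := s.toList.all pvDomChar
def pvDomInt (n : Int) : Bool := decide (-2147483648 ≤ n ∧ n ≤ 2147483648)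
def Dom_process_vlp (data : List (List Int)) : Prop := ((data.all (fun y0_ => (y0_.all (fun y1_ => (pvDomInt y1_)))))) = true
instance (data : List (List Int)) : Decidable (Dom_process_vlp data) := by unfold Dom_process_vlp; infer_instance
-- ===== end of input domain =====

-- B replaces A's per-iteration min(p) recomputation with a single online pass keeping a
-- running minimum, updating (m, idx) whenever v <= m (objective: faster, O(n) vs O(n^2)).

-- ===== PORT A =====
def process_vlp (data : List (List Int)) : List Int × List Int :=
  match PySem.List.pyGet? data 0, PySem.List.pyGet? data 1 with
  | some q, some p =>
      -- for i, v in enumerate(p): if v == min(p): p_min_index = i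
      let p_min_index : Int :=
        (PySem.List.enumerate p 0).foldl
          (fun acc iv => if some iv.2 = PySem.List.min? p (fun x => x) then iv.1 else acc) 0
      (PySem.List.slice q (some p_min_index) none, PySem.List.slice p (some p_min_index) none)
  | _, _ => ([], [])   -- data[0] / data[1] raise IndexError: excluded by Pre_

-- ===== PORT B =====
def process_vlp_alt (data : List (List Int)) : List Int × List Int :=
  match PySem.List.pyGet? data 0 with
  | none => ([], [])   -- data[0] raises IndexError: excluded by Pre_
  | some q =>
    match PySem.List.pyGet? data 1 with
    | none => ([], [])   -- data[1] raises IndexError: excluded by Pre_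
    | some p =>
        -- idx, m = 0, None; for i, v in enumerate(p): if m is None or v <= m: m, idx = v, i
        let st : Option Int × Int :=
          (PySem.List.enumerate p 0).foldl
            (fun s iv =>
              match s.1 with
              | none => (some iv.2, iv.1)
              | some m => if iv.2 ≤ m then (some iv.2, iv.1) else s)
            (none, 0)
        (PySem.List.slice q (some st.2) none, PySem.List.slice p (some st.2) none)

-- ===== PRECONDITION & SPEC =====
-- Pre_ excludes exactly the inputs where A raises IndexError (data has fewer than two rows).
def Pre_process_vlp (data : List (List Int)) : Prop := 2 ≤ data.length
instance (data : List (List Int)) : Decidable (Pre_process_vlp data) := by unfold Pre_process_vlp; infer_instance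
def pvWitness_process_vlp : List (List Int) := [[1, 2], [5, 3, 3, 7]]

def Spec_process_vlp (data : List (List Int)) (out : List Int × List Int) : Prop := out = process_vlp_alt data
instance (data : List (List Int)) (out : List Int × List Int) : Decidable (Spec_process_vlp data out) := by unfold Spec_process_vlp; infer_instance

-- ===== CLAIM (what is proved, stated in full; the proofs are below) =====
def Claim_equal_process_vlp : Prop := ∀ (data : List (List Int)), Dom_process_vlp data → Pre_process_vlp data → Spec_process_vlp data (process_vlp data)

-- ===== LEMMAS AND PROOFS =====

-- min of a nonempty list, as A's min(p) computes it
def minL (l : List Int) : Int := match l with | [] => 0 | y :: t => t.foldl min y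

theorem minL_append (l : List Int) (x : Int) (hl : l ≠ []) :
    minL (l ++ [x]) = min (minL l) x := by
  cases l with
  | nil => exact absurd rfl hl
  | cons y t => simp [minL, List.foldl_append]

theorem min?_eq_minL (l : List Int) (hl : l ≠ []) :
    PySem.List.min? l (fun x => x) = some (minL l) := by
  cases l with
  | nil => exact absurd rfl hl
  | cons y t => simpa [minL] using PySem.List.min?_id_cons y t

-- the last index (default 0) at which value m occurs, as a find from the back
def lastIdx (l : List Int) (m : Int) : Int :=
  match ((PySem.List.enumerate l 0).reverse.find? (fun iv => iv.2 == m)) with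
  | some iv => iv.1
  | none => 0

-- A's "keep overwriting with the latest match" fold equals the first match from the back.
theorem foldl_lastMatch (m a : Int) (l : List (Int × Int)) :
    l.foldl (fun acc iv => if iv.2 = m then iv.1 else acc) a
      = ((l.reverse.find? (fun iv => iv.2 == m)).map Prod.fst).getD a := by
  induction l using List.reverseRecOn with
  | nil => simp
  | append_singleton l x ih =>
      simp only [List.foldl_append, List.foldl_cons, List.foldl_nil, List.reverse_append,
        List.reverse_singleton, List.singleton_append, List.find?_cons]
      by_cases h : x.2 = m
      · simp [h]
      · have hb : (x.2 == m) = false := by simpa using h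
        simp [hb, h, ih]

-- B's running-minimum fold ends in (the minimum, its last index).
theorem Bfold_char (l : List Int) (hl : l ≠ []) :
    (PySem.List.enumerate l 0).foldl
        (fun (s : Option Int × Int) iv =>
          match s.1 with
          | none => (some iv.2, iv.1)
          | some m => if iv.2 ≤ m then (some iv.2, iv.1) else s)
        (none, 0)
      = (some (minL l), lastIdx l (minL l)) := by
  induction l using List.reverseRecOn with
  | nil => exact absurd rfl hl
  | append_singleton l x ih =>
      have henum : PySem.List.enumerate (l ++ [x]) 0
          = PySem.List.enumerate l 0 ++ [((l.length : Int), x)] := by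
        simpa using PySem.List.enumerate_append (xs := l) (ys := [x]) (s := 0)
      by_cases hl0 : l = []
      · subst hl0
        simp [PySem.List.enumerate, minL, lastIdx]
      · have ihv := ih hl0
        rw [henum, List.foldl_append, ihv]
        simp only [List.foldl_cons, List.foldl_nil]
        rw [minL_append l x hl0]
        by_cases hle : x ≤ minL l
        · have hmin : min (minL l) x = x := by omega
          have hfind : lastIdx (l ++ [x]) x = (l.length : Int) := by
            unfold lastIdx
            rw [henum]
            simp
          rw [hmin, hfind]
          simp [hle]
        · have hmin : min (minL l) x = minL l := by omega
          have hne : (x == minL l) = false := by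
            simp only [beq_eq_false_iff_ne, ne_eq]
            omega
          have hfind : lastIdx (l ++ [x]) (minL l) = lastIdx l (minL l) := by
            unfold lastIdx
            rw [henum]
            simp [hne]
          rw [hmin, hfind]
          simp [hle]

theorem map_fst_getD (o : Option (Int × Int)) :
    (Option.map Prod.fst o).getD 0 = (match o with | some iv => iv.1 | none => 0) := by
  cases o <;> rfl

-- ===== VERDICT =====
theorem process_vlp_spec : Claim_equal_process_vlp := by
  intro data _ _
  unfold Spec_process_vlp process_vlp process_vlp_alt
  cases hq : PySem.List.pyGet? data 0 with
  | none => rfl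
  | some q =>
    cases hp : PySem.List.pyGet? data 1 with
    | none => rfl
    | some p =>
      simp only
      by_cases hpe : p = []
      · subst hpe; simp [PySem.List.enumerate]
      · rw [Bfold_char p hpe]
        have hm := min?_eq_minL p hpe
        have hA :
            ((PySem.List.enumerate p 0).foldl
              (fun acc iv => if some iv.2 = PySem.List.min? p (fun x => x) then iv.1 else acc) 0)
            = lastIdx p (minL p) := by
          have hcong :
              ((PySem.List.enumerate p 0).foldl
                (fun acc iv => if some iv.2 = PySem.List.min? p (fun x => x) then iv.1 else acc) 0)
              = ((PySem.List.enumerate p 0).foldl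
                (fun acc iv => if iv.2 = minL p then iv.1 else acc) 0) := by
            simp [hm]
          rw [hcong, foldl_lastMatch (minL p) 0]
          unfold lastIdx
          rw [map_fst_getD]
        rw [hA]
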